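-- pv_equiv track=rewrite | github.com/dwijesh-r/cricket-playbook | scripts/validate_all_views.py | identify_dual_pairs
-- ===== SOURCE A (Python) =====
-- def identify_dual_pairs(views):
--     """Identify alltime/since2023 pairs."""
--     pairs = {}
--     for v in views:
--         if v.endswith("_alltime"):
--             base = v[:-8]  # strip _alltime
--             since_name = base + "_since2023"
--             if since_name in views:
--                 pairs[base] = {"alltime": v, "since2023": since_name}
--             else:
--                 pairs[base] = {"alltime": v, "since2023": None}
--         elif v.endswith("_since2023"):
--             base = v[:-10]  # strip _since2023
--             alltime_name = base + "_alltime"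
--             if base not in pairs:
--                 if alltime_name in views:
--                     pairs[base] = {"alltime": alltime_name, "since2023": v}
--                 else:
--                     pairs[base] = {"alltime": None, "since2023": v}
--     return pairs
-- ===== SOURCE B (Python) =====
-- def identify_dual_pairs(views):
--     """Identify alltime/since2023 pairs (two-pass: collect bases, then build symmetric lookups)."""
--     bases = []
--     for v in views:
--         if v.endswith("_alltime"):
--             b = v[:-8]
--         elif v.endswith("_since2023"):
--             b = v[:-10]
--         else:
--             continue
--         if b not in bases:
--             bases.append(b)
--     return {
--         b: {
--             "alltime": b + "_alltime" if b + "_alltime" in views else None,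
--             "since2023": b + "_since2023" if b + "_since2023" in views else None,
--         }
--         for b in bases
--     }
-- ===== Notes on version B (the rewrite author's own statement) =====
-- stated objective: alternative
-- what changed: Replaces A's single dict-building loop with asymmetric conditional-overwrite branch logic by a two-pass scheme: one pass collects the ordered deduplicated base names, then a symmetric comprehension builds each entry by membership lookups of base+suffix in views.
import Mathlib
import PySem

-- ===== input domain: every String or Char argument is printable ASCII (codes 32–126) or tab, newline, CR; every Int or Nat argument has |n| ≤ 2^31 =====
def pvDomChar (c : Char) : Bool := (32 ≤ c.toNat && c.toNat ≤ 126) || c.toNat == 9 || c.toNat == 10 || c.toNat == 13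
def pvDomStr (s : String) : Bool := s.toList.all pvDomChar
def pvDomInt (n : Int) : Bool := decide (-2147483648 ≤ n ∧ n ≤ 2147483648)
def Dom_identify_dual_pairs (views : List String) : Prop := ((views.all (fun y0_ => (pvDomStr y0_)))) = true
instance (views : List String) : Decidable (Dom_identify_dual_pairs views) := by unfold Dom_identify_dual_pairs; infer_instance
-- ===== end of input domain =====

-- B replaces A's single dict-building loop (asymmetric alltime/since2023 branches with conditional overwrite)
-- by a two-pass scheme: collect the ordered deduplicated base names, then build each entry symmetrically by
-- membership lookups of base+suffix in views (objective: alternative decomposition, same cost).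

-- ===== PORT A =====
-- A's loop body (kept as a named helper so the fold is readable; it is A's code verbatim)
def pvStepA (views : List String) (pairs : PySem.Dict String (List (String × Option String)))
    (v : String) : PySem.Dict String (List (String × Option String)) :=
  if PySem.Str.endswith v "_alltime" then
    let base := PySem.Str.slice v none (some (-8))      -- v[:-8]
    let since_name := base ++ "_since2023"
    if views.contains since_name then
      pairs.insert base [("alltime", some v), ("since2023", some since_name)]
    else
      pairs.insert base [("alltime", some v), ("since2023", none)]
  else if PySem.Str.endswith v "_since2023" then
    let base := PySem.Str.slice v none (some (-10))     -- v[:-10]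
    let alltime_name := base ++ "_alltime"
    if !(pairs.contains base) then
      if views.contains alltime_name then
        pairs.insert base [("alltime", some alltime_name), ("since2023", some v)]
      else
        pairs.insert base [("alltime", none), ("since2023", some v)]
    else pairs
  else pairs

def identify_dual_pairs (views : List String) : List (String × List (String × Option String)) :=
  (views.foldl (pvStepA views) PySem.Dict.empty).items

-- ===== PORT B =====
-- the value of the comprehension's entry for one base (Source B's dict-comprehension body)
def pvVal (views : List String) (b : String) : List (String × Option String) :=
  [("alltime", if views.contains (b ++ "_alltime") then some (b ++ "_alltime") else none),
   ("since2023", if views.contains (b ++ "_since2023") then some (b ++ "_since2023") else none)]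

-- Source B's first pass: classify by suffix, strip it, dedup in order ('continue' = return bases unchanged)
def pvStepB (bases : List String) (v : String) : List String :=
  if PySem.Str.endswith v "_alltime" then
    let b := PySem.Str.slice v none (some (-8))
    if bases.contains b then bases else bases ++ [b]
  else if PySem.Str.endswith v "_since2023" then
    let b := PySem.Str.slice v none (some (-10))
    if bases.contains b then bases else bases ++ [b]
  else bases

def identify_dual_pairs_alt (views : List String) : List (String × List (String × Option String)) :=
  (views.foldl pvStepB []).map (fun b => (b, pvVal views b))

-- ===== PRECONDITION & SPEC =====
def Spec_identify_dual_pairs (views : List String) (out : List (String × List (String × Option String))) : Prop := out = identify_dual_pairs_alt views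
instance (views : List String) (out : List (String × List (String × Option String))) : Decidable (Spec_identify_dual_pairs views out) := by unfold Spec_identify_dual_pairs; infer_instance

-- ===== CLAIM (what is proved, stated in full; the proofs are below) =====
def Claim_equal_identify_dual_pairs : Prop := ∀ (views : List String), Dom_identify_dual_pairs views → Spec_identify_dual_pairs views (identify_dual_pairs views)

-- ===== LEMMAS AND PROOFS =====

-- stripping "_alltime" (8 chars) from a string that ends with it and re-appending gives the string back
theorem pv_suffix_alltime (v : String) (h : PySem.Str.endswith v "_alltime" = true) :
    PySem.Str.slice v none (some (-8)) ++ "_alltime" = v := by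
  simp only [PySem.Str.endswith_eq] at h
  rw [PySem.Chars.endswith_iff] at h
  obtain ⟨pre, hpre⟩ := h
  apply String.toList_inj.mp
  rw [String.toList_append]
  simp only [PySem.Str.toList_slice, PySem.Chars.slice_eq_listSlice]
  rw [PySem.List.slice_to_neg_ofNat v.toList 8 (by norm_num), ← hpre]
  have h8 : ("_alltime".toList).length = 8 := by decide
  have hlen : (pre ++ ("_alltime".toList)).length - 8 = pre.length := by
    rw [List.length_append, h8]
    omega
  rw [hlen, List.take_left]

theorem pv_suffix_since (v : String) (h : PySem.Str.endswith v "_since2023" = true) :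
    PySem.Str.slice v none (some (-10)) ++ "_since2023" = v := by
  simp only [PySem.Str.endswith_eq] at h
  rw [PySem.Chars.endswith_iff] at h
  obtain ⟨pre, hpre⟩ := h
  apply String.toList_inj.mp
  rw [String.toList_append]
  simp only [PySem.Str.toList_slice, PySem.Chars.slice_eq_listSlice]
  rw [PySem.List.slice_to_neg_ofNat v.toList 10 (by norm_num), ← hpre]
  have h10 : ("_since2023".toList).length = 10 := by decide
  have hlen : (pre ++ ("_since2023".toList)).length - 10 = pre.length := by
    rw [List.length_append, h10]
    omega
  rw [hlen, List.take_left]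

-- A's step, characterized: in either suffix branch it writes exactly pvVal of the base
theorem pv_stepA_alltime (views : List String) (d : PySem.Dict String (List (String × Option String)))
    (v : String) (h1 : PySem.Str.endswith v "_alltime" = true) (hv : v ∈ views) :
    pvStepA views d v
      = d.insert (PySem.Str.slice v none (some (-8))) (pvVal views (PySem.Str.slice v none (some (-8)))) := by
  have hs := pv_suffix_alltime v h1
  have hcv : views.contains v = true := by simpa using hv
  simp only [pvStepA, pvVal]
  rw [if_pos h1, hs]
  by_cases h2 : views.contains (PySem.Str.slice v none (some (-8)) ++ "_since2023") = true
  · rw [if_pos h2, if_pos h2, if_pos hcv]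
  · rw [if_neg h2, if_neg h2, if_pos hcv]

theorem pv_stepA_since (views : List String) (d : PySem.Dict String (List (String × Option String)))
    (v : String) (h1 : PySem.Str.endswith v "_alltime" = false)
    (h2 : PySem.Str.endswith v "_since2023" = true) (hv : v ∈ views) :
    pvStepA views d v
      = if d.contains (PySem.Str.slice v none (some (-10))) then d
        else d.insert (PySem.Str.slice v none (some (-10))) (pvVal views (PySem.Str.slice v none (some (-10)))) := by
  have hs := pv_suffix_since v h2
  have hcv : views.contains v = true := by simpa using hv
  have h1' : ¬ (PySem.Str.endswith v "_alltime" = true) := by rw [Bool.not_eq_true]; exact h1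
  simp only [pvStepA, pvVal]
  rw [if_neg h1', if_pos h2, hs]
  by_cases h4 : d.contains (PySem.Str.slice v none (some (-10))) = true
  · rw [if_neg (by simp [h4] : ¬ ((!d.contains (PySem.Str.slice v none (some (-10)))) = true)), if_pos h4]
  · rw [if_pos (by simp [Bool.not_eq_true] at h4 ⊢; exact h4 :
        ((!d.contains (PySem.Str.slice v none (some (-10)))) = true)), if_neg h4]
    by_cases h3 : views.contains (PySem.Str.slice v none (some (-10)) ++ "_alltime") = true
    · rw [if_pos h3, if_pos h3, if_pos hcv]
    · rw [if_neg h3, if_neg h3, if_pos hcv]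

-- a dict of shape 'bases mapped through pvVal' has exactly those bases as keys
theorem pv_keys_mapped (views bs : List String) :
    (PySem.Dict.mk (bs.map (fun b => (b, pvVal views b)))).keys = bs := by
  simp [PySem.Dict.keys, List.map_map, Function.comp_def]

theorem pv_contains_mapped (views bs : List String) (k : String) :
    (PySem.Dict.mk (bs.map (fun b => (b, pvVal views b)))).contains k = bs.contains k := by
  rw [PySem.Dict.contains_eq_decide_mem_keys, pv_keys_mapped, Bool.eq_iff_iff]
  simp

-- inserting (k, pvVal k) into such a dict keeps the shape, with k deduplicated into bases
theorem pv_insert_mapped (views bs : List String) (k : String) :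
    (PySem.Dict.mk (bs.map (fun b => (b, pvVal views b)))).insert k (pvVal views k)
      = PySem.Dict.mk ((if bs.contains k then bs else bs ++ [k]).map (fun b => (b, pvVal views b))) := by
  apply PySem.Dict.ext
  by_cases hc : bs.contains k = true
  · simp only [PySem.Dict.items_insert, pv_contains_mapped, hc, if_true]
    show (bs.map _).map _ = bs.map _
    rw [List.map_map]
    refine List.map_congr_left ?_
    intro b _
    simp only [Function.comp_apply]
    by_cases hbk : b = k
    · subst hbk; simp
    · have hne : (b == k) = false := by simp [hbk]
      simp [hne]
  · have hcf : bs.contains k = false := by simpa using hc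
    simp only [PySem.Dict.items_insert, pv_contains_mapped, hcf, if_false, Bool.false_eq_true]
    show bs.map _ ++ _ = ((bs ++ [k]).map _)
    simp

-- loop invariant: A's dict is exactly B's base list mapped through pvVal
theorem pv_loop (views : List String) : ∀ (l : List String), (∀ x ∈ l, x ∈ views) → ∀ (bs : List String),
    l.foldl (pvStepA views) (PySem.Dict.mk (bs.map (fun b => (b, pvVal views b))))
      = PySem.Dict.mk ((l.foldl pvStepB bs).map (fun b => (b, pvVal views b))) := by
  intro l
  induction l with
  | nil => intro _ bs; rfl
  | cons v l ih =>
    intro hl bs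
    have hv : v ∈ views := hl v (by simp)
    have hl' : ∀ x ∈ l, x ∈ views := fun x hx => hl x (by simp [hx])
    simp only [List.foldl_cons]
    cases h1 : PySem.Str.endswith v "_alltime" with
    | true =>
      have hB : pvStepB bs v
          = if bs.contains (PySem.Str.slice v none (some (-8))) then bs
            else bs ++ [PySem.Str.slice v none (some (-8))] := by
        simp only [pvStepB]
        rw [if_pos h1]
      rw [pv_stepA_alltime views _ v h1 hv, pv_insert_mapped, hB]
      exact ih hl' _
    | false =>
      have h1' : ¬ (PySem.Str.endswith v "_alltime" = true) := by rw [Bool.not_eq_true]; exact h1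
      cases h2 : PySem.Str.endswith v "_since2023" with
      | true =>
        have hB : pvStepB bs v
            = if bs.contains (PySem.Str.slice v none (some (-10))) then bs
              else bs ++ [PySem.Str.slice v none (some (-10))] := by
          simp only [pvStepB]
          rw [if_neg h1', if_pos h2]
        rw [pv_stepA_since views _ v h1 h2 hv, pv_contains_mapped, hB]
        by_cases hc : bs.contains (PySem.Str.slice v none (some (-10))) = true
        · rw [if_pos hc, if_pos hc]
          exact ih hl' bs
        · rw [if_neg hc, if_neg hc, pv_insert_mapped, if_neg hc]
          exact ih hl' _
      | false =>
        have h2' : ¬ (PySem.Str.endswith v "_since2023" = true) := by rw [Bool.not_eq_true]; exact h2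
        have hA : pvStepA views (PySem.Dict.mk (bs.map (fun b => (b, pvVal views b)))) v
            = PySem.Dict.mk (bs.map (fun b => (b, pvVal views b))) := by
          simp only [pvStepA]
          rw [if_neg h1', if_neg h2']
        have hB : pvStepB bs v = bs := by
          simp only [pvStepB]
          rw [if_neg h1', if_neg h2']
        rw [hA, hB]
        exact ih hl' bs

-- ===== VERDICT (by name: the statement is the Claim_ definition above) =====
theorem identify_dual_pairs_spec : Claim_equal_identify_dual_pairs := by
  intro views _
  unfold Spec_identify_dual_pairs identify_dual_pairs identify_dual_pairs_alt
  have h := pv_loop views views (fun x hx => hx) []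
  simp only [List.map_nil] at h
  rw [show (PySem.Dict.empty : PySem.Dict String (List (String × Option String))) = PySem.Dict.mk [] from rfl, h]
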